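-- pv_equiv track=rewrite | github.com/ashwin275/DSA | Stack/stack_recursion.py | stack_pop
-- ===== SOURCE A (Python) =====
-- def stack_pop(stack):
--     if not stack:
--         return None
--     elif len(stack) == 1:
--         return stack.pop()
--     else:
--         top_item = stack.pop()
--         result = stack_pop(stack)
--         stack.append(top_item)
--         return result
-- ===== SOURCE B (Python) =====
-- def stack_pop(stack):
--     # Same return value and same net in-place mutation (bottom element removed,
--     # order of the rest preserved), without recursion.
--     return stack.pop(0) if stack else None
-- ===== Notes on version B (the rewrite author's own statement) =====
-- stated objective: simpler
-- what changed: Replaces the O(n) recursion that pops every element and re-appends them with a single direct removal of the bottom element (stack.pop(0)).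
import Mathlib
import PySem

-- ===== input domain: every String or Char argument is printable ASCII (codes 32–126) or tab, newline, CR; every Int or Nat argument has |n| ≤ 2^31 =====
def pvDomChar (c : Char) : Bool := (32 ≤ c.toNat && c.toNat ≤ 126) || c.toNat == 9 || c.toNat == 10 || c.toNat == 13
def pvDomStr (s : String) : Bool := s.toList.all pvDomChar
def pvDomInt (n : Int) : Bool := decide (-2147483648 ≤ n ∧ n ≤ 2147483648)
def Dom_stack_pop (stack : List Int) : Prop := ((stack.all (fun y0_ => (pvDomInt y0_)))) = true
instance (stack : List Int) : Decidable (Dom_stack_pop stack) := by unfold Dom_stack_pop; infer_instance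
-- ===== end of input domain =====

-- B removes the bottom element directly instead of recursing; equivalence proved is about
-- the RETURN value (both Pythons' net in-place effect is the same: the first element removed).

-- ===== PORT A =====
-- A: if empty → None; if singleton → pop that element; else pop the top (last),
-- recurse on the rest, re-append the top, return the recursive result.
def stack_pop (stack : List Int) : Option Int :=
  match stack with
  | [] => none
  | [x] => some x
  | a :: b :: rest =>
      -- top_item = stack.pop(); result = stack_pop(stack); stack.append(top_item)
      stack_pop ((a :: b :: rest).dropLast)
termination_by stack.length
decreasing_by simp

-- ===== PORT B =====
-- B: stack.pop(0) if stack else None  → the head, or none for the empty list.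
def stack_pop_alt (stack : List Int) : Option Int :=
  match stack with
  | [] => none
  | x :: _ => some x

-- ===== PRECONDITION & SPEC =====
def Spec_stack_pop (stack : List Int) (out : Option Int) : Prop := out = stack_pop_alt stack
instance (stack : List Int) (out : Option Int) : Decidable (Spec_stack_pop stack out) := by unfold Spec_stack_pop; infer_instance

-- ===== CLAIM (what is proved, stated in full; the proofs are below) =====
def Claim_equal_stack_pop : Prop := ∀ (stack : List Int), Dom_stack_pop stack → Spec_stack_pop stack (stack_pop stack)

-- ===== LEMMAS AND PROOFS =====
theorem stack_pop_eq_head (stack : List Int) : stack_pop stack = stack_pop_alt stack := by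
  induction stack using stack_pop.induct with
  | case1 => simp [stack_pop, stack_pop_alt]
  | case2 x => simp [stack_pop, stack_pop_alt]
  | case3 a b rest ih =>
      rw [stack_pop]
      rw [ih]
      cases rest with
      | nil => simp [stack_pop_alt]
      | cons c cs => simp [stack_pop_alt, List.dropLast]

-- ===== VERDICT (by name: the statement is the Claim_ definition above) =====
theorem stack_pop_spec : Claim_equal_stack_pop := by
  intro stack _
  exact stack_pop_eq_head stack
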